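-- pv_equiv track=rewrite | github.com/DanielChafamo/MinimalRewiring | expansion/ILP.py | ConnectDisconnect
-- ===== SOURCE A (Python) =====
-- def ConnectDisconnect(initial, final):
--   disconnect = []
--   connect = []
--   log = []
--   for i in range(len(initial)):
--       for j in range(len(initial[0])):
--           to_change = final[i][j] - initial[i][j]
--           if to_change < 0:
--               # check if there's a match if not store away
--               for k in range(len(connect)):
--                   if connect[k][0] == i:
--                       while connect[k][2] and abs(to_change):
--                           connect[k][2] -= 1
--                           to_change += 1
--                           log.append([i, connect[k][1], i, j])
--                   if not abs(to_change):
--                       break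
--               if abs(to_change):
--                   disconnect.append([i, j, to_change])
--           elif to_change > 0:
--               for k in range(len(disconnect)):
--                   if disconnect[k][0] == i:
--                       while abs(disconnect[k][2]) and to_change:
--                           disconnect[k][2] += 1
--                           to_change -= 1
--                           log.append([i, disconnect[k][1], i, j])
--                   if not abs(to_change):
--                       break
--               if abs(to_change):
--                   connect.append([i, j, to_change])
--   return log
-- ===== SOURCE B (Python) =====
-- def ConnectDisconnect(initial, final):
--     C = len(initial[0]) if initial else 0
--     log = []
--     for i, (irow, frow) in enumerate(zip(initial, final)):
--         pconn = []  # pending surpluses of this row: (col, amount > 0), oldest first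
--         pdisc = []  # pending deficits of this row: (col, amount > 0), oldest first
--         for j in range(C):
--             d = frow[j] - irow[j]
--             if d < 0:
--                 need = -d
--                 while pconn and need:
--                     col, cnt = pconn[0]
--                     take = cnt if cnt < need else need
--                     log.extend([[i, col, i, j]] * take)
--                     if cnt == take:
--                         pconn.pop(0)
--                     else:
--                         pconn[0] = (col, cnt - take)
--                     need -= take
--                 if need:
--                     pdisc.append((j, need))
--             elif d > 0:
--                 while pdisc and d:
--                     col, cnt = pdisc[0]
--                     take = cnt if cnt < d else d
--                     log.extend([[i, col, i, j]] * take)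
--                     if cnt == take:
--                         pdisc.pop(0)
--                     else:
--                         pdisc[0] = (col, cnt - take)
--                     d -= take
--                 if d:
--                     pconn.append((j, d))
--     return log
-- ===== Notes on version B (the rewrite author's own statement) =====
-- stated objective: faster
-- what changed: B indexes pending surpluses/deficits by row (fresh per-row FIFO queues instead of A's ever-growing global connect/disconnect lists rescanned for every cell) and drains a matched entry in one min()-sized batch instead of A's unit-by-unit while loop.
import Mathlib
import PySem

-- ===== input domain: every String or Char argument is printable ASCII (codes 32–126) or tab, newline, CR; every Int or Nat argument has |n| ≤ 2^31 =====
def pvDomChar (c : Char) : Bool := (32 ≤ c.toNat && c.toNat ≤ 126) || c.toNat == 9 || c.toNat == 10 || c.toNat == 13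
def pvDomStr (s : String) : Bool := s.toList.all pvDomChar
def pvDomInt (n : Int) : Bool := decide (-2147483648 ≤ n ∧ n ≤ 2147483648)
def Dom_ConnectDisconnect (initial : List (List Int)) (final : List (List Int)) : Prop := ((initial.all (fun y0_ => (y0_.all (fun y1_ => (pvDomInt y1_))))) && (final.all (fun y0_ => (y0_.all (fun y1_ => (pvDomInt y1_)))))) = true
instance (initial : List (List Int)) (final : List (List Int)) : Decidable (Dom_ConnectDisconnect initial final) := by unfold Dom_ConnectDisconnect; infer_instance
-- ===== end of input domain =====

-- B replaces A's global quadratic scans over all pending entries by per-row queues drained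
-- batch-wise (min instead of unit-by-unit loops); exact same log, asymptotically faster.


-- ===== PORT A =====
-- the unit-by-unit `while connect[k][2] and abs(to_change)` loop; fuel bounds the
-- iteration count (exact whenever cnt ≥ 0 ≥ tc, which A's invariant guarantees)
def whileC (i c j : Int) : Nat → Int → Int → List (List Int) → Int × Int × List (List Int)
  | 0, cnt, tc, log => (cnt, tc, log)
  | f+1, cnt, tc, log =>
    if cnt ≠ 0 ∧ tc ≠ 0 then whileC i c j f (cnt - 1) (tc + 1) (log ++ [[i, c, i, j]])
    else (cnt, tc, log)

-- the `while abs(disconnect[k][2]) and to_change` loop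
def whileD (i c j : Int) : Nat → Int → Int → List (List Int) → Int × Int × List (List Int)
  | 0, cnt, tc, log => (cnt, tc, log)
  | f+1, cnt, tc, log =>
    if cnt ≠ 0 ∧ tc ≠ 0 then whileD i c j f (cnt + 1) (tc - 1) (log ++ [[i, c, i, j]])
    else (cnt, tc, log)

-- `for k in range(len(connect)): … if not abs(to_change): break`
def scanConn (i j : Int) : List (Int × Int × Int) → Int → List (List Int) → List (Int × Int × Int) × Int × List (List Int)
  | [], tc, log => ([], tc, log)
  | (r, c, cnt) :: rest, tc, log =>
    let p := if r = i then whileC i c j (cnt.natAbs + tc.natAbs) cnt tc log else (cnt, tc, log)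
    if p.2.1 = 0 then ((r, c, p.1) :: rest, p.2.1, p.2.2)
    else
      let q := scanConn i j rest p.2.1 p.2.2
      ((r, c, p.1) :: q.1, q.2.1, q.2.2)

-- `for k in range(len(disconnect)): … if not abs(to_change): break`
def scanDisc (i j : Int) : List (Int × Int × Int) → Int → List (List Int) → List (Int × Int × Int) × Int × List (List Int)
  | [], tc, log => ([], tc, log)
  | (r, c, cnt) :: rest, tc, log =>
    let p := if r = i then whileD i c j (cnt.natAbs + tc.natAbs) cnt tc log else (cnt, tc, log)
    if p.2.1 = 0 then ((r, c, p.1) :: rest, p.2.1, p.2.2)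
    else
      let q := scanDisc i j rest p.2.1 p.2.2
      ((r, c, p.1) :: q.1, q.2.1, q.2.2)

-- state is (disconnect, connect, log)
def ConnectDisconnect (initial : List (List Int)) (final : List (List Int)) : List (List Int) :=
  ((List.range initial.length).foldl (fun st i =>
    (List.range (initial.headD []).length).foldl
      (fun (st : List (Int × Int × Int) × List (Int × Int × Int) × List (List Int)) j =>
        let tc := (final.getD i []).getD j 0 - (initial.getD i []).getD j 0
        if tc < 0 then
          let p := scanConn (i : Int) (j : Int) st.2.1 tc st.2.2
          (if p.2.1 ≠ 0 then st.1 ++ [((i : Int), (j : Int), p.2.1)] else st.1, p.1, p.2.2)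
        else if tc > 0 then
          let p := scanDisc (i : Int) (j : Int) st.1 tc st.2.2
          (p.1, if p.2.1 ≠ 0 then st.2.1 ++ [((i : Int), (j : Int), p.2.1)] else st.2.1, p.2.2)
        else st) st) ([], [], [])).2.2

-- ===== PORT B =====
-- `while pend and amount:` queue drain, front entry served with take = min(cnt, amount)
def drainB (i j : Int) : List (Int × Int) → Int → List (List Int) → List (Int × Int) × Int × List (List Int)
  | [], need, log => ([], need, log)
  | (col, cnt) :: rest, need, log =>
    if need = 0 then ((col, cnt) :: rest, need, log)
    else
      let take := min cnt need
      let log' := log ++ List.replicate take.toNat [i, col, i, j]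
      if cnt = take then drainB i j rest (need - take) log'
      else ((col, cnt - take) :: rest, need - take, log')

-- one row: fresh queues (pconn, pdisc), state is (pconn, pdisc, log)
def rowB (i : Int) (C : Nat) (irow frow : List Int) (log : List (List Int)) : List (List Int) :=
  ((List.range C).foldl (fun (st : List (Int × Int) × List (Int × Int) × List (List Int)) j =>
    let d := frow.getD j 0 - irow.getD j 0
    if d < 0 then
      let p := drainB i (j : Int) st.1 (-d) st.2.2
      (p.1, if p.2.1 ≠ 0 then st.2.1 ++ [((j : Int), p.2.1)] else st.2.1, p.2.2)
    else if d > 0 then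
      let p := drainB i (j : Int) st.2.1 d st.2.2
      (if p.2.1 ≠ 0 then st.1 ++ [((j : Int), p.2.1)] else st.1, p.1, p.2.2)
    else st) ([], [], log)).2.2

def ConnectDisconnect_alt (initial : List (List Int)) (final : List (List Int)) : List (List Int) :=
  (initial.zip final).zipIdx.foldl
    (fun log p => rowB (p.2 : Int) (initial.headD []).length p.1.1 p.1.2 log) []

-- ===== PRECONDITION & SPEC =====
-- Pre_ excludes exactly the inputs on which Python A raises IndexError: with a nonzero
-- column count len(initial[0]), a final shorter than initial, or a row of initial/final
-- shorter than len(initial[0]) (with zero columns A indexes nothing and returns []).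
def Pre_ConnectDisconnect (initial : List (List Int)) (final : List (List Int)) : Prop :=
  ((initial.headD []).length = 0 ∨ initial.length ≤ final.length) ∧
  (∀ r ∈ initial, (initial.headD []).length ≤ r.length) ∧
  (∀ p ∈ initial.zip final, (initial.headD []).length ≤ p.2.length)
instance (initial : List (List Int)) (final : List (List Int)) : Decidable (Pre_ConnectDisconnect initial final) := by unfold Pre_ConnectDisconnect; infer_instance

def pvWitness_ConnectDisconnect : List (List Int) × List (List Int) :=
  ([[1, 0, 2], [0, 1, 1]], [[0, 2, 1], [2, 0, 0]])

def Spec_ConnectDisconnect (initial : List (List Int)) (final : List (List Int)) (out : List (List Int)) : Prop := out = ConnectDisconnect_alt initial final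
instance (initial : List (List Int)) (final : List (List Int)) (out : List (List Int)) : Decidable (Spec_ConnectDisconnect initial final out) := by unfold Spec_ConnectDisconnect; infer_instance

-- ===== CLAIM (what is proved, stated in full; the proofs are below) =====
def Claim_equal_ConnectDisconnect : Prop := ∀ (initial : List (List Int)) (final : List (List Int)), Dom_ConnectDisconnect initial final → Pre_ConnectDisconnect initial final → Spec_ConnectDisconnect initial final (ConnectDisconnect initial final)

-- ===== LEMMAS AND PROOFS =====

-- proof-side views of A's pending lists: the still-active entries of row i, as B's queues
def filtC (i : Int) (l : List (Int × Int × Int)) : List (Int × Int) :=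
  (l.filter (fun e => e.1 == i && e.2.2 != 0)).map (fun e => (e.2.1, e.2.2))

def filtD (i : Int) (l : List (Int × Int × Int)) : List (Int × Int) :=
  (l.filter (fun e => e.1 == i && e.2.2 != 0)).map (fun e => (e.2.1, -e.2.2))

lemma filtC_nil {i : Int} {l : List (Int × Int × Int)} (h : ∀ e ∈ l, e.1 < i) :
    filtC i l = [] := by
  unfold filtC
  rw [List.filter_eq_nil_iff.2]
  · rfl
  · intro e he
    have := h e he
    simp only [Bool.and_eq_true, beq_iff_eq, bne_iff_ne, not_and]
    intro h1; omega

lemma filtD_nil {i : Int} {l : List (Int × Int × Int)} (h : ∀ e ∈ l, e.1 < i) :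
    filtD i l = [] := by
  unfold filtD
  rw [List.filter_eq_nil_iff.2]
  · rfl
  · intro e he
    have := h e he
    simp only [Bool.and_eq_true, beq_iff_eq, bne_iff_ne, not_and]
    intro h1; omega

lemma drainB_zero (i j : Int) (q : List (Int × Int)) (log : List (List Int)) :
    drainB i j q 0 log = (q, 0, log) := by
  cases q with
  | nil => rfl
  | cons a rest => rw [drainB]; simp

lemma whileC_eq (i c j : Int) : ∀ (fuel : Nat) (cnt tc : Int) (log : List (List Int)),
    0 ≤ cnt → tc ≤ 0 → min cnt (-tc) ≤ (fuel : Int) →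
    whileC i c j fuel cnt tc log =
      (cnt - min cnt (-tc), tc + min cnt (-tc),
       log ++ List.replicate (min cnt (-tc)).toNat [i, c, i, j]) := by
  intro fuel
  induction fuel with
  | zero =>
    intro cnt tc log h1 h2 h3
    have hm : min cnt (-tc) = 0 := by omega
    simp [whileC, hm]
  | succ f ih =>
    intro cnt tc log h1 h2 h3
    by_cases hc : cnt ≠ 0 ∧ tc ≠ 0
    · have hm : min cnt (-tc) = min (cnt - 1) (-(tc + 1)) + 1 := by omega
      rw [whileC, if_pos hc,
        ih (cnt - 1) (tc + 1) _ (by omega) (by omega) (by push_cast at h3 ⊢; omega)]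
      simp only [Prod.mk.injEq]
      refine ⟨by omega, by omega, ?_⟩
      have hn : (min cnt (-tc)).toNat = (min (cnt - 1) (-(tc + 1))).toNat + 1 := by omega
      simp [hn, List.replicate_succ, List.append_assoc]
    · have hm : min cnt (-tc) = 0 := by omega
      rw [whileC, if_neg hc]
      simp [hm]

lemma whileD_eq (i c j : Int) : ∀ (fuel : Nat) (cnt tc : Int) (log : List (List Int)),
    cnt ≤ 0 → 0 ≤ tc → min (-cnt) tc ≤ (fuel : Int) →
    whileD i c j fuel cnt tc log =
      (cnt + min (-cnt) tc, tc - min (-cnt) tc,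
       log ++ List.replicate (min (-cnt) tc).toNat [i, c, i, j]) := by
  intro fuel
  induction fuel with
  | zero =>
    intro cnt tc log h1 h2 h3
    have hm : min (-cnt) tc = 0 := by omega
    simp [whileD, hm]
  | succ f ih =>
    intro cnt tc log h1 h2 h3
    by_cases hc : cnt ≠ 0 ∧ tc ≠ 0
    · have hm : min (-cnt) tc = min (-(cnt + 1)) (tc - 1) + 1 := by omega
      rw [whileD, if_pos hc,
        ih (cnt + 1) (tc - 1) _ (by omega) (by omega) (by push_cast at h3 ⊢; omega)]
      simp only [Prod.mk.injEq]
      refine ⟨by omega, by omega, ?_⟩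
      have hn : (min (-cnt) tc).toNat = (min (-(cnt + 1)) (tc - 1)).toNat + 1 := by omega
      simp [hn, List.replicate_succ, List.append_assoc]
    · have hm : min (-cnt) tc = 0 := by omega
      rw [whileD, if_neg hc]
      simp [hm]

lemma filtC_cons_pos {i c cnt : Int} {rest : List (Int × Int × Int)} (h : cnt ≠ 0) :
    filtC i ((i, c, cnt) :: rest) = (c, cnt) :: filtC i rest := by simp [filtC, h]

lemma filtC_cons_zero {i c : Int} {rest : List (Int × Int × Int)} :
    filtC i ((i, c, (0 : Int)) :: rest) = filtC i rest := by simp [filtC]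

lemma filtD_cons_pos {i c cnt : Int} {rest : List (Int × Int × Int)} (h : cnt ≠ 0) :
    filtD i ((i, c, cnt) :: rest) = (c, -cnt) :: filtD i rest := by simp [filtD, h]

lemma filtD_cons_zero {i c : Int} {rest : List (Int × Int × Int)} :
    filtD i ((i, c, (0 : Int)) :: rest) = filtD i rest := by simp [filtD]

lemma scanC_drain (i j : Int) : ∀ (conn : List (Int × Int × Int)) (tc : Int) (log : List (List Int)),
    tc < 0 → (∀ e ∈ conn, e.1 = i → 0 ≤ e.2.2) →
    drainB i j (filtC i conn) (-tc) log =
      (filtC i (scanConn i j conn tc log).1, -(scanConn i j conn tc log).2.1,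
       (scanConn i j conn tc log).2.2)
    ∧ (scanConn i j conn tc log).2.1 ≤ 0
    ∧ (∀ e ∈ (scanConn i j conn tc log).1, e.1 = i → 0 ≤ e.2.2)
    ∧ (scanConn i j conn tc log).1.map (fun e => e.1) = conn.map (fun e => e.1) := by
  intro conn
  induction conn with
  | nil =>
    intro tc log htc _
    simp [scanConn, filtC, drainB]
    omega
  | cons hd rest ih =>
    obtain ⟨r, c, cnt⟩ := hd
    intro tc log htc hsg
    by_cases hr : r = i
    · rw [hr] at hsg ⊢
      have hcnt : 0 ≤ cnt := hsg (i, c, cnt) (by simp) rfl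
      have hfuel : min cnt (-tc) ≤ ((cnt.natAbs + tc.natAbs : Nat) : Int) := by omega
      have hw := whileC_eq i c j (cnt.natAbs + tc.natAbs) cnt tc log hcnt (le_of_lt htc) hfuel
      by_cases hz : tc + min cnt (-tc) = 0
      · -- the need is fully served by this entry: A breaks out of the k-loop
        have hscan : scanConn i j ((i, c, cnt) :: rest) tc log =
            ((i, c, cnt - min cnt (-tc)) :: rest, tc + min cnt (-tc),
             log ++ List.replicate (min cnt (-tc)).toNat [i, c, i, j]) := by
          rw [scanConn, if_pos (rfl : (i : Int) = i), hw]
          exact if_pos hz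
        have hm : min cnt (-tc) = -tc := by omega
        have hcp : (0 : Int) < cnt := by omega
        refine ⟨?_, ?_, ?_, ?_⟩
        · rw [hscan, filtC_cons_pos (by omega : cnt ≠ 0)]
          dsimp only
          simp only [drainB]
          rw [if_neg (by omega : ¬ -tc = 0)]
          by_cases hce : cnt = min cnt (-tc)
          · rw [if_pos hce, show -tc - min cnt (-tc) = 0 by omega, drainB_zero,
              show cnt - min cnt (-tc) = 0 by omega, filtC_cons_zero]
            simp only [Prod.mk.injEq, true_and, and_true]
            omega
          · rw [if_neg hce, filtC_cons_pos (by omega : cnt - min cnt (-tc) ≠ 0)]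
            simp only [Prod.mk.injEq, true_and, and_true]
            omega
        · rw [hscan]; dsimp only; omega
        · rw [hscan]
          intro e he
          rcases List.mem_cons.1 he with h | h
          · subst h; intro _; dsimp only; omega
          · exact hsg e (by simp [h])
        · rw [hscan]; dsimp only; simp
      · -- entry exhausted, A moves on to the next pending entry
        have hm : min cnt (-tc) = cnt := by omega
        have htc' : tc + min cnt (-tc) < 0 := by omega
        have hscan : scanConn i j ((i, c, cnt) :: rest) tc log =
            ((i, c, cnt - min cnt (-tc)) ::
               (scanConn i j rest (tc + min cnt (-tc))
                 (log ++ List.replicate (min cnt (-tc)).toNat [i, c, i, j])).1,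
             (scanConn i j rest (tc + min cnt (-tc))
               (log ++ List.replicate (min cnt (-tc)).toNat [i, c, i, j])).2.1,
             (scanConn i j rest (tc + min cnt (-tc))
               (log ++ List.replicate (min cnt (-tc)).toNat [i, c, i, j])).2.2) := by
          rw [scanConn, if_pos (rfl : (i : Int) = i), hw]
          exact if_neg hz
        obtain ⟨ihd, ihs, ihsg, ihm⟩ :=
          ih (tc + min cnt (-tc))
            (log ++ List.replicate (min cnt (-tc)).toNat [i, c, i, j]) htc'
            (fun e he hi => hsg e (by simp [he]) hi)
        refine ⟨?_, ?_, ?_, ?_⟩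
        · rw [hscan, show cnt - min cnt (-tc) = 0 by omega, filtC_cons_zero]
          dsimp only
          by_cases hc0 : cnt = 0
          · rw [hc0] at ihd ⊢
            rw [filtC_cons_zero]
            simp only [show min (0 : Int) (-tc) = 0 by omega, add_zero, Int.toNat_zero,
              List.replicate_zero, List.append_nil] at ihd ⊢
            exact ihd
          · rw [filtC_cons_pos hc0]
            simp only [drainB]
            rw [if_neg (by omega : ¬ -tc = 0), if_pos (by omega : cnt = min cnt (-tc)),
              show -tc - min cnt (-tc) = -(tc + min cnt (-tc)) by omega]
            exact ihd
        · rw [hscan]; dsimp only; exact ihs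
        · rw [hscan]
          intro e he
          rcases List.mem_cons.1 he with h | h
          · subst h; intro _; dsimp only; omega
          · exact ihsg e h
        · rw [hscan]; dsimp only; simp [ihm]
    · -- other row: entry is skipped on both sides
      have h1 : scanConn i j ((r, c, cnt) :: rest) tc log =
          ((r, c, cnt) :: (scanConn i j rest tc log).1,
           (scanConn i j rest tc log).2.1, (scanConn i j rest tc log).2.2) := by
        rw [scanConn]
        simp only [if_neg hr]
        rw [if_neg (show ¬ ((cnt, tc, log) : Int × Int × List (List Int)).2.1 = 0 from by
          show ¬ tc = 0; omega)]
      have h2 : filtC i ((r, c, cnt) :: rest) = filtC i rest := by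
        simp [filtC, hr]
      obtain ⟨ihd, ihs, ihsg, ihm⟩ := ih tc log htc (fun e he hi => hsg e (by simp [he]) hi)
      refine ⟨?_, ?_, ?_, ?_⟩
      · rw [h2, h1, ihd]
        simp [filtC, hr]
      · rw [h1]; exact ihs
      · rw [h1]
        intro e he
        rcases List.mem_cons.1 he with h | h
        · subst h; intro hh; exact absurd hh hr
        · exact ihsg e h
      · rw [h1]; simp [ihm]

lemma scanD_drain (i j : Int) : ∀ (disc : List (Int × Int × Int)) (tc : Int) (log : List (List Int)),
    0 < tc → (∀ e ∈ disc, e.1 = i → e.2.2 ≤ 0) →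
    drainB i j (filtD i disc) tc log =
      (filtD i (scanDisc i j disc tc log).1, (scanDisc i j disc tc log).2.1,
       (scanDisc i j disc tc log).2.2)
    ∧ 0 ≤ (scanDisc i j disc tc log).2.1
    ∧ (∀ e ∈ (scanDisc i j disc tc log).1, e.1 = i → e.2.2 ≤ 0)
    ∧ (scanDisc i j disc tc log).1.map (fun e => e.1) = disc.map (fun e => e.1) := by
  intro disc
  induction disc with
  | nil =>
    intro tc log htc _
    simp [scanDisc, filtD, drainB]
    omega
  | cons hd rest ih =>
    obtain ⟨r, c, cnt⟩ := hd
    intro tc log htc hsg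
    by_cases hr : r = i
    · rw [hr] at hsg ⊢
      have hcnt : cnt ≤ 0 := hsg (i, c, cnt) (by simp) rfl
      have hfuel : min (-cnt) tc ≤ ((cnt.natAbs + tc.natAbs : Nat) : Int) := by omega
      have hw := whileD_eq i c j (cnt.natAbs + tc.natAbs) cnt tc log hcnt (le_of_lt htc) hfuel
      by_cases hz : tc - min (-cnt) tc = 0
      · -- the surplus is fully served by this entry: A breaks out of the k-loop
        have hscan : scanDisc i j ((i, c, cnt) :: rest) tc log =
            ((i, c, cnt + min (-cnt) tc) :: rest, tc - min (-cnt) tc,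
             log ++ List.replicate (min (-cnt) tc).toNat [i, c, i, j]) := by
          rw [scanDisc, if_pos (rfl : (i : Int) = i), hw]
          exact if_pos hz
        have hm : min (-cnt) tc = tc := by omega
        have hcp : cnt < 0 := by omega
        refine ⟨?_, ?_, ?_, ?_⟩
        · rw [hscan, filtD_cons_pos (by omega : cnt ≠ 0)]
          dsimp only
          simp only [drainB]
          rw [if_neg (by omega : ¬ tc = 0)]
          by_cases hce : -cnt = min (-cnt) tc
          · rw [if_pos hce, show tc - min (-cnt) tc = 0 by omega, drainB_zero,
              show cnt + min (-cnt) tc = 0 by omega, filtD_cons_zero]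
          · rw [if_neg hce, filtD_cons_pos (by omega : cnt + min (-cnt) tc ≠ 0),
              show -cnt - min (-cnt) tc = -(cnt + min (-cnt) tc) from by omega]
        · rw [hscan]; dsimp only; omega
        · rw [hscan]
          intro e he
          rcases List.mem_cons.1 he with h | h
          · subst h; intro _; dsimp only; omega
          · exact hsg e (by simp [h])
        · rw [hscan]; dsimp only; simp
      · -- entry exhausted, A moves on to the next pending entry
        have hm : min (-cnt) tc = -cnt := by omega
        have htc' : 0 < tc - min (-cnt) tc := by omega
        have hscan : scanDisc i j ((i, c, cnt) :: rest) tc log =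
            ((i, c, cnt + min (-cnt) tc) ::
               (scanDisc i j rest (tc - min (-cnt) tc)
                 (log ++ List.replicate (min (-cnt) tc).toNat [i, c, i, j])).1,
             (scanDisc i j rest (tc - min (-cnt) tc)
               (log ++ List.replicate (min (-cnt) tc).toNat [i, c, i, j])).2.1,
             (scanDisc i j rest (tc - min (-cnt) tc)
               (log ++ List.replicate (min (-cnt) tc).toNat [i, c, i, j])).2.2) := by
          rw [scanDisc, if_pos (rfl : (i : Int) = i), hw]
          exact if_neg hz
        obtain ⟨ihd, ihs, ihsg, ihm⟩ :=
          ih (tc - min (-cnt) tc)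
            (log ++ List.replicate (min (-cnt) tc).toNat [i, c, i, j]) htc'
            (fun e he hi => hsg e (by simp [he]) hi)
        refine ⟨?_, ?_, ?_, ?_⟩
        · rw [hscan, show cnt + min (-cnt) tc = 0 by omega, filtD_cons_zero]
          dsimp only
          by_cases hc0 : cnt = 0
          · rw [hc0] at ihd ⊢
            rw [filtD_cons_zero]
            simp only [show min (-(0 : Int)) tc = 0 by omega, sub_zero, Int.toNat_zero,
              List.replicate_zero, List.append_nil] at ihd ⊢
            exact ihd
          · rw [filtD_cons_pos hc0]
            simp only [drainB]
            rw [if_neg (by omega : ¬ tc = 0), if_pos (by omega : -cnt = min (-cnt) tc)]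
            exact ihd
        · rw [hscan]; dsimp only; exact ihs
        · rw [hscan]
          intro e he
          rcases List.mem_cons.1 he with h | h
          · subst h; intro _; dsimp only; omega
          · exact ihsg e h
        · rw [hscan]; dsimp only; simp [ihm]
    · -- other row: entry is skipped on both sides
      have h1 : scanDisc i j ((r, c, cnt) :: rest) tc log =
          ((r, c, cnt) :: (scanDisc i j rest tc log).1,
           (scanDisc i j rest tc log).2.1, (scanDisc i j rest tc log).2.2) := by
        rw [scanDisc]
        simp only [if_neg hr]
        rw [if_neg (show ¬ ((cnt, tc, log) : Int × Int × List (List Int)).2.1 = 0 from by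
          show ¬ tc = 0; omega)]
      have h2 : filtD i ((r, c, cnt) :: rest) = filtD i rest := by
        simp [filtD, hr]
      obtain ⟨ihd, ihs, ihsg, ihm⟩ := ih tc log htc (fun e he hi => hsg e (by simp [he]) hi)
      refine ⟨?_, ?_, ?_, ?_⟩
      · rw [h2, h1, ihd]
        simp [filtD, hr]
      · rw [h1]; exact ihs
      · rw [h1]
        intro e he
        rcases List.mem_cons.1 he with h | h
        · subst h; intro hh; exact absurd hh hr
        · exact ihsg e h
      · rw [h1]; simp [ihm]

-- one cell of A, with the current row's two source rows fixed
def stepA (i : Int) (irow frow : List Int)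
    (st : List (Int × Int × Int) × List (Int × Int × Int) × List (List Int)) (j : Nat) :
    List (Int × Int × Int) × List (Int × Int × Int) × List (List Int) :=
  let tc := frow.getD j 0 - irow.getD j 0
  if tc < 0 then
    let p := scanConn i (j : Int) st.2.1 tc st.2.2
    (if p.2.1 ≠ 0 then st.1 ++ [(i, (j : Int), p.2.1)] else st.1, p.1, p.2.2)
  else if tc > 0 then
    let p := scanDisc i (j : Int) st.1 tc st.2.2
    (p.1, if p.2.1 ≠ 0 then st.2.1 ++ [(i, (j : Int), p.2.1)] else st.2.1, p.2.2)
  else st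

-- one cell of B
def stepB (i : Int) (irow frow : List Int)
    (st : List (Int × Int) × List (Int × Int) × List (List Int)) (j : Nat) :
    List (Int × Int) × List (Int × Int) × List (List Int) :=
  let d := frow.getD j 0 - irow.getD j 0
  if d < 0 then
    let p := drainB i (j : Int) st.1 (-d) st.2.2
    (p.1, if p.2.1 ≠ 0 then st.2.1 ++ [((j : Int), p.2.1)] else st.2.1, p.2.2)
  else if d > 0 then
    let p := drainB i (j : Int) st.2.1 d st.2.2
    (if p.2.1 ≠ 0 then st.1 ++ [((j : Int), p.2.1)] else st.1, p.1, p.2.2)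
  else st

lemma rowB_eq (i : Int) (C : Nat) (irow frow : List Int) (log : List (List Int)) :
    rowB i C irow frow log = ((List.range C).foldl (stepB i irow frow) ([], [], log)).2.2 := rfl

lemma filtC_append_one {i c tc : Int} {l : List (Int × Int × Int)} (h : tc ≠ 0) :
    filtC i (l ++ [(i, c, tc)]) = filtC i l ++ [(c, tc)] := by
  simp [filtC, List.filter_append, h]

lemma filtD_append_one {i c tc : Int} {l : List (Int × Int × Int)} (h : tc ≠ 0) :
    filtD i (l ++ [(i, c, tc)]) = filtD i l ++ [(c, -tc)] := by
  simp [filtD, List.filter_append, h]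

lemma row_equiv (i : Int) (irow frow : List Int) :
    ∀ (js : List Nat) (disc conn : List (Int × Int × Int)) (log : List (List Int)),
    (∀ e ∈ conn, e.1 = i → 0 ≤ e.2.2) → (∀ e ∈ disc, e.1 = i → e.2.2 ≤ 0) →
    js.foldl (stepB i irow frow) (filtC i conn, filtD i disc, log)
      = (filtC i (js.foldl (stepA i irow frow) (disc, conn, log)).2.1,
         filtD i (js.foldl (stepA i irow frow) (disc, conn, log)).1,
         (js.foldl (stepA i irow frow) (disc, conn, log)).2.2)
    ∧ (∀ e ∈ (js.foldl (stepA i irow frow) (disc, conn, log)).2.1,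
         e.1 = i ∨ e.1 ∈ conn.map (fun e => e.1))
    ∧ (∀ e ∈ (js.foldl (stepA i irow frow) (disc, conn, log)).1,
         e.1 = i ∨ e.1 ∈ disc.map (fun e => e.1)) := by
  intro js
  induction js with
  | nil =>
    intro disc conn log _ _
    exact ⟨rfl, fun e he => Or.inr (List.mem_map.2 ⟨e, he, rfl⟩),
      fun e he => Or.inr (List.mem_map.2 ⟨e, he, rfl⟩)⟩
  | cons j js ih =>
    intro disc conn log hc hd
    simp only [List.foldl_cons]
    rcases lt_trichotomy (frow.getD j 0 - irow.getD j 0) 0 with hlt | heq | hgt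
    · -- deficit cell: drain the connect queue
      obtain ⟨sd, ss, ssg, sm⟩ := scanC_drain i (j : Int) conn
        (frow.getD j 0 - irow.getD j 0) log hlt hc
      have hsA : stepA i irow frow (disc, conn, log) j =
          (if (scanConn i (j : Int) conn (frow.getD j 0 - irow.getD j 0) log).2.1 ≠ 0 then
             disc ++ [(i, (j : Int), (scanConn i (j : Int) conn (frow.getD j 0 - irow.getD j 0) log).2.1)]
           else disc,
           (scanConn i (j : Int) conn (frow.getD j 0 - irow.getD j 0) log).1,
           (scanConn i (j : Int) conn (frow.getD j 0 - irow.getD j 0) log).2.2) := by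
        simp only [stepA, if_pos hlt]
      have hsB : stepB i irow frow (filtC i conn, filtD i disc, log) j =
          (filtC i (scanConn i (j : Int) conn (frow.getD j 0 - irow.getD j 0) log).1,
           if (scanConn i (j : Int) conn (frow.getD j 0 - irow.getD j 0) log).2.1 ≠ 0 then
             filtD i disc ++ [((j : Int), -(scanConn i (j : Int) conn (frow.getD j 0 - irow.getD j 0) log).2.1)]
           else filtD i disc,
           (scanConn i (j : Int) conn (frow.getD j 0 - irow.getD j 0) log).2.2) := by
        simp only [stepB, if_pos hlt]
        rw [sd]
        by_cases h0 : (scanConn i (j : Int) conn (frow.getD j 0 - irow.getD j 0) log).2.1 = 0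
        · simp
        · simp
      rw [hsA, hsB]
      set s := scanConn i (j : Int) conn (frow.getD j 0 - irow.getD j 0) log with hs
      have hdisc' : filtD i (if s.2.1 ≠ 0 then disc ++ [(i, (j : Int), s.2.1)] else disc)
          = if s.2.1 ≠ 0 then filtD i disc ++ [((j : Int), -s.2.1)] else filtD i disc := by
        by_cases h0 : s.2.1 = 0
        · simp [h0]
        · simp only [h0, ne_eq, not_false_iff, if_true]
          exact filtD_append_one h0
      obtain ⟨ih1, ih2, ih3⟩ := ih
        (if s.2.1 ≠ 0 then disc ++ [(i, (j : Int), s.2.1)] else disc) s.1 s.2.2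
        ssg
        (by
          intro e he
          by_cases h0 : s.2.1 = 0
          · simp only [h0, ne_eq, not_true_eq_false, if_false] at he
            exact hd e he
          · simp only [h0, ne_eq, not_false_iff, if_true] at he
            rcases List.mem_append.1 he with h | h
            · exact hd e h
            · simp only [List.mem_singleton] at h
              subst h; intro _; exact ss)
      rw [hdisc'] at ih1
      refine ⟨ih1, ?_, ?_⟩
      · intro e he
        rcases ih2 e he with h | h
        · exact Or.inl h
        · rw [sm] at h; exact Or.inr h
      · intro e he
        rcases ih3 e he with h | h
        · exact Or.inl h
        · by_cases h0 : s.2.1 = 0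
          · simp only [h0, ne_eq, not_true_eq_false, if_false] at h
            exact Or.inr h
          · simp only [h0, ne_eq, not_false_iff, if_true, List.map_append] at h
            rcases List.mem_append.1 h with h | h
            · exact Or.inr h
            · simp only [List.map_cons, List.map_nil, List.mem_singleton] at h
              exact Or.inl h
    · -- equal cell: nothing happens on either side
      have hsA : stepA i irow frow (disc, conn, log) j = (disc, conn, log) := by
        simp only [stepA]
        rw [heq]
        norm_num
      have hsB : stepB i irow frow (filtC i conn, filtD i disc, log) j
          = (filtC i conn, filtD i disc, log) := by
        simp only [stepB]
        rw [heq]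
        norm_num
      rw [hsA, hsB]
      exact ih disc conn log hc hd
    · -- surplus cell: drain the disconnect queue
      obtain ⟨sd, ss, ssg, sm⟩ := scanD_drain i (j : Int) disc
        (frow.getD j 0 - irow.getD j 0) log hgt hd
      have hsA : stepA i irow frow (disc, conn, log) j =
          ((scanDisc i (j : Int) disc (frow.getD j 0 - irow.getD j 0) log).1,
           if (scanDisc i (j : Int) disc (frow.getD j 0 - irow.getD j 0) log).2.1 ≠ 0 then
             conn ++ [(i, (j : Int), (scanDisc i (j : Int) disc (frow.getD j 0 - irow.getD j 0) log).2.1)]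
           else conn,
           (scanDisc i (j : Int) disc (frow.getD j 0 - irow.getD j 0) log).2.2) := by
        simp only [stepA, if_neg (by omega : ¬ frow.getD j 0 - irow.getD j 0 < 0), if_pos hgt]
      have hsB : stepB i irow frow (filtC i conn, filtD i disc, log) j =
          (if (scanDisc i (j : Int) disc (frow.getD j 0 - irow.getD j 0) log).2.1 ≠ 0 then
             filtC i conn ++ [((j : Int), (scanDisc i (j : Int) disc (frow.getD j 0 - irow.getD j 0) log).2.1)]
           else filtC i conn,
           filtD i (scanDisc i (j : Int) disc (frow.getD j 0 - irow.getD j 0) log).1,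
           (scanDisc i (j : Int) disc (frow.getD j 0 - irow.getD j 0) log).2.2) := by
        simp only [stepB, if_neg (by omega : ¬ frow.getD j 0 - irow.getD j 0 < 0), if_pos hgt]
        rw [sd]
      rw [hsA, hsB]
      set s := scanDisc i (j : Int) disc (frow.getD j 0 - irow.getD j 0) log with hs
      have hconn' : filtC i (if s.2.1 ≠ 0 then conn ++ [(i, (j : Int), s.2.1)] else conn)
          = if s.2.1 ≠ 0 then filtC i conn ++ [((j : Int), s.2.1)] else filtC i conn := by
        by_cases h0 : s.2.1 = 0
        · simp [h0]
        · simp only [h0, ne_eq, not_false_iff, if_true]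
          exact filtC_append_one h0
      obtain ⟨ih1, ih2, ih3⟩ := ih s.1
        (if s.2.1 ≠ 0 then conn ++ [(i, (j : Int), s.2.1)] else conn) s.2.2
        (by
          intro e he
          by_cases h0 : s.2.1 = 0
          · simp only [h0, ne_eq, not_true_eq_false, if_false] at he
            exact hc e he
          · simp only [h0, ne_eq, not_false_iff, if_true] at he
            rcases List.mem_append.1 he with h | h
            · exact hc e h
            · simp only [List.mem_singleton] at h
              subst h; intro _; exact ss)
        ssg
      rw [hconn'] at ih1
      refine ⟨ih1, ?_, ?_⟩
      · intro e he
        rcases ih2 e he with h | h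
        · exact Or.inl h
        · by_cases h0 : s.2.1 = 0
          · simp only [h0, ne_eq, not_true_eq_false, if_false] at h
            exact Or.inr h
          · simp only [h0, ne_eq, not_false_iff, if_true, List.map_append] at h
            rcases List.mem_append.1 h with h | h
            · exact Or.inr h
            · simp only [List.map_cons, List.map_nil, List.mem_singleton] at h
              exact Or.inl h
      · intro e he
        rcases ih3 e he with h | h
        · exact Or.inl h
        · rw [sm] at h; exact Or.inr h

lemma rows_equiv (C : Nat) :
    ∀ (pairs : List (List Int × List Int)) (n : Nat)
      (disc conn : List (Int × Int × Int)) (log : List (List Int)),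
    (∀ e ∈ conn, e.1 < (n : Int)) → (∀ e ∈ disc, e.1 < (n : Int)) →
    (pairs.zipIdx n).foldl (fun lg p => rowB (p.2 : Int) C p.1.1 p.1.2 lg) log
      = ((pairs.zipIdx n).foldl
          (fun st p => (List.range C).foldl (stepA (p.2 : Int) p.1.1 p.1.2) st)
          (disc, conn, log)).2.2 := by
  intro pairs
  induction pairs with
  | nil => intro n disc conn log _ _; rfl
  | cons pr ps ih =>
    intro n disc conn log hcn hdn
    simp only [List.zipIdx_cons, List.foldl_cons]
    have hfc : filtC (n : Int) conn = [] := filtC_nil hcn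
    have hfd : filtD (n : Int) disc = [] := filtD_nil hdn
    obtain ⟨h1, h2, h3⟩ := row_equiv (n : Int) pr.1 pr.2 (List.range C) disc conn log
      (fun e he hi => absurd hi (by have := hcn e he; omega))
      (fun e he hi => absurd hi (by have := hdn e he; omega))
    rw [hfc, hfd] at h1
    rw [rowB_eq, h1]
    dsimp only
    set sA := (List.range C).foldl (stepA (n : Int) pr.1 pr.2) (disc, conn, log) with hsA
    exact ih (n + 1) sA.1 sA.2.1 sA.2.2
      (by
        intro e he
        rcases h2 e he with h | h
        · push_cast; omega
        · rcases List.mem_map.1 h with ⟨e', he', hee⟩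
          have := hcn e' he'
          push_cast; omega)
      (by
        intro e he
        rcases h3 e he with h | h
        · push_cast; omega
        · rcases List.mem_map.1 h with ⟨e', he', hee⟩
          have := hdn e' he'
          push_cast; omega)

lemma foldl_zipIdx_stepA (C : Nat) :
    ∀ (l : List (List Int × List Int)) (n : Nat)
      (st : List (Int × Int × Int) × List (Int × Int × Int) × List (List Int)),
    (l.zipIdx n).foldl
        (fun st p => (List.range C).foldl (stepA (p.2 : Int) p.1.1 p.1.2) st) st
      = (List.range l.length).foldl
          (fun st k => (List.range C).foldl
            (stepA (((n + k : Nat) : Int)) (l.getD k ([], [])).1 (l.getD k ([], [])).2) st) st := by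
  intro l
  induction l with
  | nil => intro n st; rfl
  | cons a l ihl =>
    intro n st
    simp only [List.zipIdx_cons, List.foldl_cons, List.length_cons, List.range_succ_eq_map,
      List.foldl_map, Nat.succ_eq_add_one, List.getD_cons_zero, Nat.add_zero]
    rw [ihl (n + 1)]
    have hfe : (fun (st : List (Int × Int × Int) × List (Int × Int × Int) × List (List Int))
          (k : Nat) => (List.range C).foldl
            (stepA (((n + (k + 1) : Nat) : Int)) (((a :: l).getD (k + 1) ([], [])).1)
              (((a :: l).getD (k + 1) ([], [])).2)) st)
        = (fun st k => (List.range C).foldl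
            (stepA ((((n + 1) + k : Nat) : Int)) ((l.getD k ([], [])).1)
              ((l.getD k ([], [])).2)) st) := by
      funext st k
      rw [List.getD_cons_succ, show n + (k + 1) = (n + 1) + k from by omega]
    rw [hfe]

lemma zip_getD : ∀ (l1 l2 : List (List Int)) (k : Nat), k < l1.length → l1.length ≤ l2.length →
    (l1.zip l2).getD k ([], []) = (l1.getD k [], l2.getD k []) := by
  intro l1
  induction l1 with
  | nil => intro l2 k h _; simp at h
  | cons a l ih =>
    intro l2 k hk hle
    cases l2 with
    | nil => simp at hle
    | cons b l2 =>
      cases k with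
      | zero => simp
      | succ k => simpa using ih l2 k (by simpa using hk) (by simpa using hle)

-- ===== VERDICT (by name: the statement is the Claim_ definition above) =====
lemma foldl_const {α β : Type} : ∀ (l : List α) (st : β), l.foldl (fun st _ => st) st = st := by
  intro l
  induction l with
  | nil => intro st; rfl
  | cons a l ih => intro st; exact ih st

theorem ConnectDisconnect_spec : Claim_equal_ConnectDisconnect := by
  intro initial final _ hpre
  obtain ⟨hlen', _, _⟩ := hpre
  unfold Spec_ConnectDisconnect
  by_cases hC : (initial.headD []).length = 0
  · -- zero columns: neither program touches any cell, both logs are empty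
    unfold ConnectDisconnect ConnectDisconnect_alt
    simp only [hC, List.range_zero, List.foldl_nil]
    rw [foldl_const]
    have : ∀ (l : List ((List Int × List Int) × Nat)) (log : List (List Int)),
        l.foldl (fun log p => rowB (p.2 : Int) 0 p.1.1 p.1.2 log) log = log := by
      intro l
      induction l with
      | nil => intro log; rfl
      | cons a l ih =>
        intro log
        simp only [List.foldl_cons]
        rw [show rowB (a.2 : Int) 0 a.1.1 a.1.2 log = log from rfl]
        exact ih log
    rw [this]
  · have hlen : initial.length ≤ final.length := hlen'.resolve_left hC
    have hzl : (initial.zip final).length = initial.length := by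
      rw [List.length_zip]; omega
    have hA0 : ConnectDisconnect initial final =
        ((List.range initial.length).foldl
          (fun st (i : Nat) => (List.range (initial.headD []).length).foldl
            (stepA (i : Int) (initial.getD i []) (final.getD i [])) st) ([], [], [])).2.2 := rfl
    have hB0 : ConnectDisconnect_alt initial final =
        ((initial.zip final).zipIdx 0).foldl
          (fun lg p => rowB (p.2 : Int) (initial.headD []).length p.1.1 p.1.2 lg) [] := rfl
    rw [hA0, hB0, rows_equiv (initial.headD []).length (initial.zip final) 0 [] [] []
      (by simp) (by simp), foldl_zipIdx_stepA, hzl]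
    have hbody : (List.range initial.length).foldl
        (fun st k => (List.range (initial.headD []).length).foldl
          (stepA (((0 + k : Nat) : Int)) (((initial.zip final).getD k ([], [])).1)
            (((initial.zip final).getD k ([], [])).2)) st) ([], [], [])
        = (List.range initial.length).foldl
          (fun st (i : Nat) => (List.range (initial.headD []).length).foldl
            (stepA (i : Int) (initial.getD i []) (final.getD i [])) st) ([], [], []) := by
      apply PySem.List.foldl_congr_mem'
      intro k hk acc
      rw [zip_getD initial final k (List.mem_range.1 hk) hlen, Nat.zero_add]
    rw [hbody]
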